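-- pv_equiv track=rewrite | github.com/fanfank/Codecademy-Python | ch15_Practice_Makes_Perfect/10_censor.py | censor
-- ===== SOURCE A (Python) =====
-- def get_next_array(word):
--     nxt = [-1]
--     for i in range(1, len(word)):
--         n = nxt[i - 1]
--         nxt.append(-1)
--         while n != -1:
--             if word[n + 1] == word[i]:
--                 nxt[i] = n + 1
--                 break
--             n = nxt[n]
--         if n == -1 and word[0] == word[i]:
--             nxt[i] = 0
--     return nxt
--
-- def KMP(text, word, nxt, i):
--     j = 0
--     while i < len(text) and j < len(word):
--         while j != -1 and text[i] != word[j]: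
--             if j == 0:
--                 j = -1
--             else:
--                 j = nxt[j-1] + 1
--         i += 1
--         j += 1
--     if j == len(word):
--         return i
--     return -1
--
-- def censor(text, word): #use KMP algorithm
--     nxt = get_next_array(word)
--     i = 0
--     while i < len(text) and i != -1:
--         i = KMP(text, word, nxt, i)
--         if i == -1:
--             break;
--         newtext = text[0: i - len(word)] + "*" * len(word) + text[i :]
--         text = newtext
--     return text
-- ===== SOURCE B (Python) =====
-- def censor(text, word):
--     # Single left-to-right KMP pass: build the standard (length-valued) failure
--     # table once, scan the text once collecting output segments, join them once.
--     m = len(word)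
--     if m == 0:
--         return text
--     fail = [0] * m
--     k = 0
--     for i in range(1, m):
--         while k > 0 and word[i] != word[k]:
--             k = fail[k - 1]
--         if word[i] == word[k]:
--             k += 1
--         fail[i] = k
--     res = []
--     last = 0
--     j = 0
--     stars = '*' * m
--     for i, c in enumerate(text):
--         while j > 0 and c != word[j]:
--             j = fail[j - 1]
--         if c == word[j]:
--             j += 1
--         if j == m:
--             res.append(text[last:i + 1 - m])
--             res.append(stars)
--             last = i + 1
--             j = 0
--     res.append(text[last:])
--     return ''.join(res)
-- ===== Notes on version B (the rewrite author's own statement) =====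
-- stated objective: faster
-- what changed: A restarts a full KMP search from scratch after every match and rebuilds the whole string per match via slicing; B makes one KMP pass over the text collecting segment boundaries and builds the output once with join.
-- outside the precondition, e.g. on censor('ab', ''): A does not finish within the time limit, B returns 'ab'
import Mathlib
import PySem

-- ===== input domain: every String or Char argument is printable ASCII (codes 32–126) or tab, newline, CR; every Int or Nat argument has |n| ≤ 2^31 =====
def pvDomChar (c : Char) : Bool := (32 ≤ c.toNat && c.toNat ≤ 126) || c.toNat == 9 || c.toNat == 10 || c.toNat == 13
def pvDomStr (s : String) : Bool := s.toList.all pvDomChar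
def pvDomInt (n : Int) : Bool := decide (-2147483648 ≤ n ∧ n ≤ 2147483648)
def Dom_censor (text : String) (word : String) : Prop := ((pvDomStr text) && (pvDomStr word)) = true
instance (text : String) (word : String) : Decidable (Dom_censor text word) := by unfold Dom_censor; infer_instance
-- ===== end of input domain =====

-- B makes one KMP pass and builds the output once (measured faster); A rebuilds the text per match.

-- ===== PORT A =====
-- inner 'while n != -1' loop of get_next_array (fuel-bounded; the chain n -> nxt[n] strictly decreases)
def gnaInner (w : List Char) (i : Int) : Nat → List Int → Int → (List Int × Int)
  | 0, nxt, n => (nxt, n)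
  | fuel+1, nxt, n =>
    if n = -1 then (nxt, n)
    else if PySem.List.pyGetD w (n + 1) ' ' = PySem.List.pyGetD w i ' ' then
      (PySem.List.pySetD nxt i (n + 1), n)
    else gnaInner w i fuel nxt (PySem.List.pyGetD nxt n (-1))

-- 'for i in range(1, len(word))' loop of get_next_array
def gnaOuter (w : List Char) : List Int → List Int → List Int
  | [], nxt => nxt
  | i :: is, nxt =>
    let n0 := PySem.List.pyGetD nxt (i - 1) (-1)
    let nxt1 := nxt ++ [-1]
    let r := gnaInner w i (w.length + 1) nxt1 n0
    let nxt2 := if r.2 = -1 ∧ PySem.List.pyGetD w 0 ' ' = PySem.List.pyGetD w i ' '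
                then PySem.List.pySetD r.1 i 0 else r.1
    gnaOuter w is nxt2

def getNextArray (w : List Char) : List Int :=
  gnaOuter w (PySem.List.pyRange 1 (w.length : Int) 1) [-1]

-- inner 'while j != -1 and text[i] != word[j]' loop of KMP (fuel-bounded; j strictly decreases)
def kmpCasc (w : List Char) (nxt : List Int) (c : Char) : Nat → Int → Int
  | 0, j => j
  | fuel+1, j =>
    if j ≠ -1 ∧ c ≠ PySem.List.pyGetD w j ' ' then
      kmpCasc w nxt c fuel (if j = 0 then -1 else PySem.List.pyGetD nxt (j - 1) (-1) + 1)
    else j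

-- outer 'while i < len(text) and j < len(word)' loop of KMP; i advances by exactly 1 each pass,
-- so it is structural recursion on the remaining suffix text[i:]
def kmpGo (w : List Char) (nxt : List Int) : List Char → Int → Int → Int
  | [], i, j => if j = (w.length : Int) then i else -1
  | c :: rest, i, j =>
    if j < (w.length : Int) then
      kmpGo w nxt rest (i + 1) (kmpCasc w nxt c (w.length + 2) j + 1)
    else if j = (w.length : Int) then i else -1

def kmpA (t w : List Char) (nxt : List Int) (i : Int) : Int :=
  kmpGo w nxt (t.drop i.toNat) i 0

-- 'while i < len(text) and i != -1' loop of censor; each iteration moves i past one match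
def censorGo (w : List Char) (nxt : List Int) (stars : List Char) : Nat → List Char → Int → List Char
  | 0, t, _ => t
  | fuel+1, t, i =>
    if i < (t.length : Int) ∧ i ≠ -1 then
      let i' := kmpA t w nxt i
      if i' = -1 then t
      else censorGo w nxt stars fuel
        (PySem.List.slice t (some 0) (some (i' - (w.length : Int))) ++ stars
          ++ PySem.List.slice t (some i') none) i'
    else t

def censor (text : String) (word : String) : String :=
  let t := text.toList
  let w := word.toList
  String.ofList (censorGo w (getNextArray w) (List.replicate w.length '*') (t.length + 1) t 0)

-- ===== PORT B =====
-- 'while k > 0 and c != word[k]: k = fail[k-1]' — the shared cascade shape of Source B's two inner loops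
def failCasc (w : List Char) (fail : List Nat) (c : Char) : Nat → Nat → Nat
  | 0, k => k
  | fuel+1, k =>
    if k ≠ 0 ∧ c ≠ PySem.List.pyGetD w (k : Int) ' ' then
      failCasc w fail c fuel (PySem.List.pyGetD fail ((k : Int) - 1) 0)
    else k

-- 'for i in range(1, m)' building the (length-valued) failure table
def failBuild (w : List Char) : List Int → List Nat → Nat → List Nat
  | [], fail, _ => fail
  | i :: is, fail, k =>
    let c := PySem.List.pyGetD w i ' '
    let k1 := failCasc w fail c (w.length + 1) k
    let k2 := if c = PySem.List.pyGetD w (k1 : Int) ' ' then k1 + 1 else k1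
    failBuild w is (PySem.List.pySetD fail i k2) k2

def failTable (w : List Char) : List Nat :=
  failBuild w (PySem.List.pyRange 1 (w.length : Int) 1) (List.replicate w.length 0) 0

-- 'for i, c in enumerate(text)' single scan collecting output segments
def scanGo (w : List Char) (fail : List Nat) (t stars : List Char) :
    List (Int × Char) → Int → Nat → List (List Char) → List (List Char)
  | [], last, _, res => res ++ [PySem.List.slice t (some last) none]
  | (i, c) :: rest, last, j, res =>
    let j1 := failCasc w fail c (w.length + 1) j
    let j2 := if c = PySem.List.pyGetD w (j1 : Int) ' ' then j1 + 1 else j1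
    if j2 = w.length then
      scanGo w fail t stars rest (i + 1) 0
        (res ++ [PySem.List.slice t (some last) (some (i + 1 - (w.length : Int)))] ++ [stars])
    else scanGo w fail t stars rest last j2 res

def censor_alt (text : String) (word : String) : String :=
  let t := text.toList
  let w := word.toList
  if w.length = 0 then text
  else String.ofList (PySem.Chars.join []
    (scanGo w (failTable w) t (List.replicate w.length '*') (PySem.List.enumerate t) 0 0 []))

-- ===== PRECONDITION & SPEC =====
-- Pre_ excludes only the inputs with word = "" and text ≠ "": there A's KMP returns i unchanged,
-- so A's while loop never advances and the Python diverges (no value is returned).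
def Pre_censor (text : String) (word : String) : Prop := word ≠ "" ∨ text = ""
instance (text : String) (word : String) : Decidable (Pre_censor text word) := by unfold Pre_censor; infer_instance

def pvWitness_censor : String × String := ("hey hey hey", "hey")

def Spec_censor (text : String) (word : String) (out : String) : Prop := out = censor_alt text word
instance (text : String) (word : String) (out : String) : Decidable (Spec_censor text word out) := by unfold Spec_censor; infer_instance

-- ===== CLAIM (what is proved, stated in full; the proofs are below) =====
def Claim_equal_censor : Prop := ∀ (text : String) (word : String), Dom_censor text word → Pre_censor text word → Spec_censor text word (censor text word)

-- ===== LEMMAS AND PROOFS =====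

-- relation between A's index-valued next array and B's length-valued failure table
def relT (m : Nat) (nxt : List Int) (fail : List Nat) : Prop :=
  nxt.length = m ∧ fail.length = m ∧
    (∀ q, q < m → nxt.getD q (-1) = (fail.getD q 0 : Int) - 1) ∧
    (∀ q : Nat, fail.getD q 0 ≤ q)

-- setting an entry to its current value is a no-op
lemma set_getD_eq {α : Type} (xs : List α) (n : Nat) (d : α) (h : n < xs.length) :
    xs.set n (xs.getD n d) = xs := by
  apply List.ext_getElem
  · simp
  · intro i h1 h2
    rw [List.getElem_set]
    split
    · subst ‹n = i›; rw [List.getD_eq_getElem _ _ h2]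
    · rfl

-- exit analysis of B's cascade: the result does not grow, and the exit condition holds
lemma failCasc_exit (w : List Char) (fail : List Nat) (c : Char)
    (hB : ∀ q : Nat, fail.getD q 0 ≤ q) :
    ∀ k fa, k < fa →
      failCasc w fail c fa k ≤ k ∧
        (failCasc w fail c fa k = 0 ∨ c = PySem.List.pyGetD w (failCasc w fail c fa k : Int) ' ') := by
  intro k
  induction k using Nat.strong_induction_on with
  | _ k ih =>
    intro fa hfa
    cases fa with
    | zero => omega
    | succ fuel =>
      simp only [failCasc]
      by_cases hg : k ≠ 0 ∧ c ≠ PySem.List.pyGetD w (k : Int) ' '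
      · rw [if_pos hg]
        have hk1 : 1 ≤ k := Nat.one_le_iff_ne_zero.mpr hg.1
        have hcast : ((k : Int) - 1) = ((k - 1 : Nat) : Int) := by omega
        rw [hcast, PySem.List.pyGetD_natCast]
        have hlt : fail.getD (k - 1) 0 < k := lt_of_le_of_lt (hB (k - 1)) (by omega)
        have h := ih _ hlt fuel (by omega)
        exact ⟨le_trans h.1 (le_of_lt hlt), h.2⟩
      · rw [if_neg hg]
        push_neg at hg
        rcases Nat.eq_zero_or_pos k with h0 | hpos
        · exact ⟨le_refl _, Or.inl h0⟩
        · exact ⟨le_refl _, Or.inr (hg (by omega))⟩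

-- B's one-character automaton step (exactly the two lines scanGo executes per character)
def pstep (w : List Char) (fail : List Nat) (c : Char) (j : Nat) : Nat :=
  if c = PySem.List.pyGetD w (failCasc w fail c (w.length + 1) j : Int) ' '
  then failCasc w fail c (w.length + 1) j + 1 else failCasc w fail c (w.length + 1) j

lemma pstep_le (w : List Char) (fail : List Nat) (c : Char)
    (hB : ∀ q : Nat, fail.getD q 0 ≤ q) (j : Nat) (hj : j ≤ w.length) :
    pstep w fail c j ≤ j + 1 := by
  have h := failCasc_exit w fail c hB j (w.length + 1) (by omega)
  unfold pstep
  split <;> omega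

lemma pstep_le_m (w : List Char) (fail : List Nat) (c : Char)
    (hB : ∀ q : Nat, fail.getD q 0 ≤ q) (j : Nat) (hj : j < w.length) :
    pstep w fail c j ≤ w.length := by
  have h := failCasc_exit w fail c hB j (w.length + 1) (by omega)
  unfold pstep
  split <;> omega

-- lockstep between A's Int-valued cascade (chain on j) and B's Nat-valued cascade (chain on k = j)
lemma casc_rel (w : List Char) (nxt : List Int) (fail : List Nat) (c : Char)
    (hr : relT w.length nxt fail) :
    ∀ k, k < w.length → ∀ fa fb, k < fa → k < fb →
      kmpCasc w nxt c fa (k : Int) + 1 =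
        (((if c = PySem.List.pyGetD w (failCasc w fail c fb k : Int) ' '
           then failCasc w fail c fb k + 1 else failCasc w fail c fb k) : Nat) : Int) := by
  obtain ⟨hln, hlf, hrel, hB⟩ := hr
  intro k
  induction k using Nat.strong_induction_on with
  | _ k ih =>
    intro hkm fa fb hfa hfb
    cases fa with
    | zero => omega
    | succ fuelA =>
      cases fb with
      | zero => omega
      | succ fuelB =>
        by_cases hc : c = PySem.List.pyGetD w (k : Int) ' '
        · -- match at k: both cascades stop here, B then increments
          have hA : kmpCasc w nxt c (fuelA + 1) (k : Int) = (k : Int) := by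
            simp only [kmpCasc]
            rw [if_neg]; simp [hc]
          have hBc : failCasc w fail c (fuelB + 1) k = k := by
            simp only [failCasc]
            rw [if_neg]; simp [hc]
          rw [hA, hBc, if_pos hc]
          push_cast; ring
        · rcases Nat.eq_zero_or_pos k with h0 | hpos
          · -- mismatch at 0: A goes to -1 and stops, B stays at 0
            subst h0
            have hA : kmpCasc w nxt c (fuelA + 1) ((0 : Nat) : Int) = -1 := by
              simp only [kmpCasc]
              rw [if_pos ⟨by norm_num, hc⟩]
              norm_num
              cases fuelA <;> simp [kmpCasc]
            have hBc : failCasc w fail c (fuelB + 1) 0 = 0 := by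
              simp [failCasc]
            rw [hA, hBc, if_neg hc]
            norm_num
          · -- mismatch at k ≥ 1: both fall back to fail[k-1]
            have hcast : ((k : Int) - 1) = ((k - 1 : Nat) : Int) := by omega
            set k' := fail.getD (k - 1) 0 with hk'
            have hk'lt : k' < k := lt_of_le_of_lt (hB (k - 1)) (by omega)
            have hnxt : nxt.getD (k - 1) (-1) = (k' : Int) - 1 := hrel (k - 1) (by omega)
            have hA : kmpCasc w nxt c (fuelA + 1) (k : Int) =
                kmpCasc w nxt c fuelA (k' : Int) := by
              simp only [kmpCasc]
              rw [if_pos ⟨by omega, fun h => hc h⟩, if_neg (by omega)]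
              rw [hcast, PySem.List.pyGetD_natCast, hnxt]
              congr 1; ring
            have hBc : failCasc w fail c (fuelB + 1) k = failCasc w fail c fuelB k' := by
              simp only [failCasc]
              rw [if_pos ⟨by omega, fun h => hc h⟩, hcast, PySem.List.pyGetD_natCast]
            rw [hA, hBc]
            exact ih k' hk'lt (by omega) fuelA fuelB (by omega) (by omega)

-- A's cascade-plus-increment equals B's step
lemma kmp_step (w : List Char) (nxt : List Int) (fail : List Nat) (c : Char)
    (hr : relT w.length nxt fail) (j : Nat) (hj : j < w.length) :
    kmpCasc w nxt c (w.length + 2) (j : Int) + 1 = ((pstep w fail c j : Nat) : Int) :=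
  casc_rel w nxt fail c hr j hj (w.length + 2) (w.length + 1) (by omega) (by omega)

-- B's automaton run: characters consumed from state j until the first full match, if any
def fm (w : List Char) (fail : List Nat) : List Char → Nat → Option Nat
  | [], _ => none
  | c :: t, j =>
    if pstep w fail c j = w.length then some 1
    else (fm w fail t (pstep w fail c j)).map (· + 1)

lemma fm_bounds1 (w : List Char) (fail : List Nat) :
    ∀ s j k, fm w fail s j = some k → 1 ≤ k ∧ k ≤ s.length := by
  intro s
  induction s with
  | nil => intro j k h; simp [fm] at h
  | cons c t ih =>
    intro j k h
    simp only [fm] at h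
    split at h
    · obtain rfl : (1 : Nat) = k := Option.some.inj h
      simp
    · obtain ⟨k', hk', rfl⟩ := Option.map_eq_some_iff.mp h
      have := ih _ _ hk'
      simp only [List.length_cons]
      omega

lemma fm_ge (w : List Char) (fail : List Nat) (hB : ∀ q : Nat, fail.getD q 0 ≤ q) :
    ∀ s j k, j < w.length → fm w fail s j = some k → w.length ≤ j + k := by
  intro s
  induction s with
  | nil => intro j k hj h; simp [fm] at h
  | cons c t ih =>
    intro j k hj h
    simp only [fm] at h
    have hle := pstep_le w fail c hB j (by omega)
    split at h
    · obtain rfl : (1 : Nat) = k := Option.some.inj h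
      omega
    · obtain ⟨k', hk', rfl⟩ := Option.map_eq_some_iff.mp h
      have hlt : pstep w fail c j < w.length :=
        lt_of_le_of_ne (pstep_le_m w fail c hB j hj) (by assumption)
      have := ih _ _ hlt hk'
      omega

lemma kmpGo_full (w : List Char) (nxt : List Int) :
    ∀ (s : List Char) (i : Int), kmpGo w nxt s i ((w.length : Nat) : Int) = i := by
  intro s i
  cases s <;> simp [kmpGo]

lemma kmpGo_eq (w : List Char) (nxt : List Int) (fail : List Nat)
    (hr : relT w.length nxt fail) :
    ∀ (s : List Char) (i : Int) (j : Nat), j < w.length →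
      kmpGo w nxt s i ((j : Nat) : Int) =
        (match fm w fail s j with | none => -1 | some k => i + (k : Int)) := by
  have hB := hr.2.2.2
  intro s
  induction s with
  | nil =>
    intro i j hj
    simp only [kmpGo, fm]
    rw [if_neg (by omega)]
  | cons c rest ih =>
    intro i j hj
    simp only [kmpGo]
    rw [if_pos (by omega), kmp_step w nxt fail c hr j hj]
    by_cases hm : pstep w fail c j = w.length
    · rw [hm, kmpGo_full]
      simp only [fm, if_pos hm]
      norm_num
    · rw [ih (i + 1) (pstep w fail c j)
        (lt_of_le_of_ne (pstep_le_m w fail c hB j hj) hm)]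
      simp only [fm, if_neg hm]
      cases hfm : fm w fail rest (pstep w fail c j)
      · simp
      · simp only [Option.map_some]
        push_cast
        ring

lemma kmpA_eq (w : List Char) (nxt : List Int) (fail : List Nat) (t : List Char)
    (hr : relT w.length nxt fail) (hm : 0 < w.length) (p : Nat) :
    kmpA t w nxt ((p : Nat) : Int) =
      (match fm w fail (t.drop p) 0 with | none => -1 | some k => ((p : Int) + (k : Int))) := by
  unfold kmpA
  rw [Int.toNat_natCast]
  have h0 : ((0 : Int)) = ((0 : Nat) : Int) := by norm_num
  rw [h0, kmpGo_eq w nxt fail hr (t.drop p) (p : Int) 0 hm]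

-- the censored text from a given suffix on, built once (what both programs compute)
def pieces (w : List Char) (fail : List Nat) (stars : List Char) (s : List Char) : List Char :=
  if h : (fm w fail s 0).isSome then
    let k := (fm w fail s 0).get h
    s.take (k - w.length) ++ stars ++ pieces w fail stars (s.drop k)
  else s
termination_by s.length
decreasing_by
  have := fm_bounds1 w fail s 0 ((fm w fail s 0).get h) (Option.some_get h).symm
  simp only [List.length_drop]
  omega

lemma pieces_none (w : List Char) (fail : List Nat) (stars : List Char) (s : List Char)
    (h : fm w fail s 0 = none) : pieces w fail stars s = s := by
  rw [pieces]
  simp [h]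

lemma pieces_some (w : List Char) (fail : List Nat) (stars : List Char) (s : List Char)
    (k : Nat) (h : fm w fail s 0 = some k) :
    pieces w fail stars s =
      s.take (k - w.length) ++ stars ++ pieces w fail stars (s.drop k) := by
  rw [pieces]
  simp [h]

-- A's censor loop, run on any text agreeing with the plan: result = processed prefix ++ pieces of the suffix
lemma censorGo_eq (w : List Char) (nxt : List Int) (fail : List Nat) (stars : List Char)
    (hr : relT w.length nxt fail) (hm : 0 < w.length) (hst : stars.length = w.length) :
    ∀ (fuel : Nat) (t : List Char) (p : Nat), p ≤ t.length → t.length - p < fuel →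
      censorGo w nxt stars fuel t ((p : Nat) : Int) =
        t.take p ++ pieces w fail stars (t.drop p) := by
  have hB := hr.2.2.2
  intro fuel
  induction fuel with
  | zero => intro t p h1 h2; omega
  | succ fuel ih =>
    intro t p hp hfuel
    simp only [censorGo]
    by_cases hlt : p < t.length
    case neg =>
      rw [if_neg (by omega)]
      rw [List.drop_of_length_le (by omega), pieces_none _ _ _ _ (by simp [fm]),
        List.take_of_length_le (by omega), List.append_nil]
    case pos =>
      rw [if_pos ⟨by omega, by omega⟩]
      rw [kmpA_eq w nxt fail t hr hm p]
      cases hfm : fm w fail (t.drop p) 0 with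
      | none =>
        simp only [hfm]
        rw [if_pos trivial, pieces_none _ _ _ _ hfm, List.take_append_drop]
      | some k =>
        simp only [hfm]
        obtain ⟨hk1, hk2⟩ := fm_bounds1 w fail _ _ _ hfm
        have hkm2 : w.length ≤ k := by
          have := fm_ge w fail hB _ _ _ hm hfm
          omega
        have hklen : k ≤ t.length - p := by simpa using hk2
        have hne : ¬((p : Int) + (k : Int) = -1) := by omega
        rw [if_neg hne]
        have e1 : (p : Int) + (k : Int) - (w.length : Int) = ((p + k - w.length : Nat) : Int) := by
          omega
        have e2 : (p : Int) + (k : Int) = ((p + k : Nat) : Int) := by omega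
        rw [e1, e2, PySem.List.slice_zero_start, PySem.List.slice_to_natCast,
          PySem.List.slice_from_natCast]
        have hlen' : (t.take (p + k - w.length) ++ stars ++ t.drop (p + k)).length = t.length := by
          simp only [List.length_append, List.length_take, List.length_drop, hst]
          omega
        have hIH := ih (t.take (p + k - w.length) ++ stars ++ t.drop (p + k)) (p + k)
          (by rw [hlen']; omega) (by rw [hlen']; omega)
        rw [hIH]
        rw [List.take_left' (by simp only [List.length_append, List.length_take, hst]; omega),
          List.drop_left' (by simp only [List.length_append, List.length_take, hst]; omega)]
        rw [pieces_some _ _ _ _ _ hfm, List.drop_drop]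
        have e4 : List.take p t ++ List.take (k - w.length) (List.drop p t) = List.take (p + k - w.length) t := by
          rw [← List.take_add]
          congr 1
          omega
        rw [← e4]
        simp [List.append_assoc]

lemma enumerate_cons {α : Type} (c : α) (rest : List α) (n : Int) :
    PySem.List.enumerate (c :: rest) n = (n, c) :: PySem.List.enumerate rest (n + 1) := rfl

lemma join_nil_eq_flatten (xss : List (List Char)) : PySem.Chars.join [] xss = xss.flatten := by
  induction xss with
  | nil => rfl
  | cons x xs ih => cases xs <;> simp_all [PySem.Chars.join, List.intercalate, List.intersperse]

-- folding the match-expansion of the scan's tail back into pieces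
lemma pieces_shape (w : List Char) (fail : List Nat) (t stars : List Char)
    (hB : ∀ q : Nat, fail.getD q 0 ≤ q) (hm : 0 < w.length) (q : Nat) :
    (match fm w fail (t.drop q) 0 with
     | none => t.drop q
     | some k => (t.drop q).take (q + k - w.length - q) ++ stars
         ++ pieces w fail stars (t.drop (q + k)))
      = pieces w fail stars (t.drop q) := by
  cases hfm : fm w fail (t.drop q) 0 with
  | none => simp only [hfm]; exact (pieces_none _ _ _ _ hfm).symm
  | some k =>
    simp only [hfm]
    rw [pieces_some _ _ _ _ _ hfm]
    have hkm : w.length ≤ k := by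
      have := fm_ge w fail hB _ _ _ hm hfm
      omega
    have e1 : q + k - w.length - q = k - w.length := by omega
    have e2 : t.drop (q + k) = (t.drop q).drop k := by rw [List.drop_drop]
    rw [e1, e2]

-- B's single scan, from any position/state, appends exactly the pieces of the remaining plan
lemma scanGo_eq (w : List Char) (fail : List Nat) (t stars : List Char)
    (hB : ∀ q : Nat, fail.getD q 0 ≤ q) (hm : 0 < w.length) :
    ∀ (s : List Char) (p last j : Nat) (res : List (List Char)),
      t.drop p = s → last ≤ p → j + last ≤ p → j < w.length →
      (scanGo w fail t stars (PySem.List.enumerate s ((p : Nat) : Int)) ((last : Nat) : Int) j res).flatten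
        = res.flatten ++
          (match fm w fail s j with
           | none => t.drop last
           | some k => ((t.drop last).take (p + k - w.length - last)) ++ stars
               ++ pieces w fail stars (t.drop (p + k))) := by
  intro s
  induction s with
  | nil =>
    intro p last j res hdrop hlast hj hjm
    simp only [PySem.List.enumerate, scanGo, fm]
    rw [PySem.List.slice_from_natCast]
    simp
  | cons c rest ih =>
    intro p last j res hdrop hlast hj hjm
    have hplen : p < t.length := by
      have := congrArg List.length hdrop
      simp at this
      omega
    have hrest : t.drop (p + 1) = rest := by
      rw [← List.drop_drop, hdrop]
      rfl
    rw [enumerate_cons]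
    simp only [scanGo]
    have hps : (if c = PySem.List.pyGetD w ((failCasc w fail c (w.length + 1) j : Nat) : Int) ' '
        then failCasc w fail c (w.length + 1) j + 1
        else failCasc w fail c (w.length + 1) j) = pstep w fail c j := rfl
    rw [hps]
    have hple : pstep w fail c j ≤ j + 1 := pstep_le w fail c hB j (by omega)
    by_cases h2 : pstep w fail c j = w.length
    · rw [if_pos h2]
      have ec : ((p : Int) + 1) = ((p + 1 : Nat) : Int) := by omega
      have hlm : last + w.length ≤ p + 1 := by omega
      have eb : ((p + 1 : Nat) : Int) - (w.length : Int) = ((p + 1 - w.length : Nat) : Int) := by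
        omega
      rw [ec, eb]
      rw [ih (p + 1) (p + 1) 0 _ hrest (le_refl _) (by omega) hm]
      simp only [fm, if_pos h2]
      rw [← hrest]
      rw [pieces_shape w fail t stars hB hm (p + 1)]
      rw [PySem.List.slice_natCast]
      simp [List.append_assoc]
    · rw [if_neg h2]
      have hlt2 : pstep w fail c j < w.length :=
        lt_of_le_of_ne (pstep_le_m w fail c hB j hjm) h2
      have ec : ((p : Int) + 1) = ((p + 1 : Nat) : Int) := by omega
      rw [ec, ih (p + 1) last (pstep w fail c j) res hrest (by omega) (by omega) hlt2]
      simp only [fm, if_neg h2]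
      cases hfm : fm w fail rest (pstep w fail c j) with
      | none => simp [hfm]
      | some k' =>
        simp only [Option.map_some]
        have e6 : p + 1 + k' = p + (k' + 1) := by omega
        rw [e6]

lemma getD_set_self {α : Type} (xs : List α) (n : Nat) (v d : α) (h : n < xs.length) :
    (xs.set n v).getD n d = v := by
  rw [List.getD_eq_getElem _ _ (by simpa using h)]
  simp

lemma getD_set_ne {α : Type} (xs : List α) (n r : Nat) (v d : α) (h : r ≠ n) :
    (xs.set n v).getD r d = xs.getD r d := by
  rcases lt_or_ge r xs.length with hr | hr
  · rw [List.getD_eq_getElem _ _ (by simpa using hr), List.getD_eq_getElem _ _ hr,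
      List.getElem_set, if_neg (fun hh => h hh.symm)]
  · rw [List.getD_eq_default _ _ (by simpa using hr), List.getD_eq_default _ _ hr]

-- one pass of A's inner table loop against one step of B's (lockstep on k = n + 1)
lemma inner_rel (w : List Char) (nxtC : List Int) (failL : List Nat) (p : Nat)
    (hpm : p < w.length)
    (hlenC : nxtC.length = p + 1) (hlast : nxtC.getD p (-1) = -1)
    (hrel : ∀ r, r < p → nxtC.getD r (-1) = (failL.getD r 0 : Int) - 1)
    (hB : ∀ r : Nat, failL.getD r 0 ≤ r) :
    ∀ k fa fb, k ≤ p → k < fa → k < fb →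
      (if (gnaInner w ((p : Nat) : Int) fa nxtC ((k : Int) - 1)).2 = -1 ∧
            PySem.List.pyGetD w 0 ' ' = PySem.List.pyGetD w ((p : Nat) : Int) ' '
       then PySem.List.pySetD (gnaInner w ((p : Nat) : Int) fa nxtC ((k : Int) - 1)).1 ((p : Nat) : Int) 0
       else (gnaInner w ((p : Nat) : Int) fa nxtC ((k : Int) - 1)).1)
        = nxtC.set p
            (((if PySem.List.pyGetD w ((p : Nat) : Int) ' ' =
                  PySem.List.pyGetD w ((failCasc w failL (PySem.List.pyGetD w ((p : Nat) : Int) ' ') fb k : Nat) : Int) ' '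
               then failCasc w failL (PySem.List.pyGetD w ((p : Nat) : Int) ' ') fb k + 1
               else failCasc w failL (PySem.List.pyGetD w ((p : Nat) : Int) ' ') fb k : Nat) : Int) - 1) := by
  intro k
  induction k using Nat.strong_induction_on with
  | _ k ihk =>
    intro fa fb hkp hfa hfb
    cases fa with
    | zero => omega
    | succ fuelA =>
      cases fb with
      | zero => omega
      | succ fuelB =>
        rcases Nat.eq_zero_or_pos k with h0 | hpos
        · subst h0
          have hA : gnaInner w ((p : Nat) : Int) (fuelA + 1) nxtC (((0 : Nat) : Int) - 1) = (nxtC, -1) := by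
            simp only [gnaInner]
            norm_num
          have hBc : failCasc w failL (PySem.List.pyGetD w ((p : Nat) : Int) ' ') (fuelB + 1) 0 = 0 := by
            simp [failCasc]
          rw [hA, hBc]
          by_cases hc : PySem.List.pyGetD w 0 ' ' = PySem.List.pyGetD w ((p : Nat) : Int) ' '
          · have hc0 : PySem.List.pyGetD w (((0 : Nat) : Int)) ' ' = PySem.List.pyGetD w ((p : Nat) : Int) ' ' := by
              rw [Nat.cast_zero]
              exact hc
            rw [if_pos ⟨rfl, hc⟩, if_pos hc0.symm]
            rw [PySem.List.pySetD_natCast]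
            norm_num
          · rw [if_neg (fun hh => hc hh.2),
              if_neg (fun hh => hc (by rw [Nat.cast_zero] at hh; exact hh.symm))]
            rw [show ((0 : Nat) : Int) - 1 = (-1 : Int) from by norm_num, ← hlast,
              set_getD_eq nxtC p (-1) (by omega)]
        · -- k ≥ 1
          have en : ((k : Int) - 1) + 1 = ((k : Nat) : Int) := by ring
          have hne : ¬(((k : Int) - 1) = -1) := by omega
          by_cases hc : PySem.List.pyGetD w ((k : Nat) : Int) ' ' = PySem.List.pyGetD w ((p : Nat) : Int) ' '
          · -- match at k: A writes n+1 and stops with n ≠ -1; B stops at k and increments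
            have hA : gnaInner w ((p : Nat) : Int) (fuelA + 1) nxtC ((k : Int) - 1) =
                (PySem.List.pySetD nxtC ((p : Nat) : Int) (((k : Int) - 1) + 1), (k : Int) - 1) := by
              simp only [gnaInner]
              rw [if_neg hne, if_pos (by rw [en]; exact hc)]
            have hBc : failCasc w failL (PySem.List.pyGetD w ((p : Nat) : Int) ' ') (fuelB + 1) k = k := by
              simp only [failCasc]
              rw [if_neg (fun hh => hh.2 hc.symm)]
            rw [hA, hBc]
            rw [if_neg (fun hh => hne hh.1)]
            rw [if_pos hc.symm, en, PySem.List.pySetD_natCast]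
            push_cast
            ring_nf
          · -- mismatch at k: both chains fall back to fail[k-1]
            have ek : ((k : Int) - 1) = ((k - 1 : Nat) : Int) := by omega
            have hgetn : PySem.List.pyGetD nxtC ((k : Int) - 1) (-1) =
                ((failL.getD (k - 1) 0 : Nat) : Int) - 1 := by
              rw [ek, PySem.List.pyGetD_natCast]
              exact hrel (k - 1) (by omega)
            have hA : gnaInner w ((p : Nat) : Int) (fuelA + 1) nxtC ((k : Int) - 1) =
                gnaInner w ((p : Nat) : Int) fuelA nxtC (((failL.getD (k - 1) 0 : Nat) : Int) - 1) := by
              simp only [gnaInner]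
              rw [if_neg hne, if_neg (by rw [en]; exact hc), hgetn]
            have hBc : failCasc w failL (PySem.List.pyGetD w ((p : Nat) : Int) ' ') (fuelB + 1) k =
                failCasc w failL (PySem.List.pyGetD w ((p : Nat) : Int) ' ') fuelB (failL.getD (k - 1) 0) := by
              simp only [failCasc]
              rw [if_pos ⟨by omega, fun h => hc h.symm⟩, ek]
              simp only [PySem.List.pyGetD_natCast]
            rw [hA, hBc]
            have hk' : failL.getD (k - 1) 0 < k := lt_of_le_of_lt (hB (k - 1)) (by omega)
            exact ihk _ hk' fuelA fuelB (by omega) (by omega) (by omega)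

-- both table-building loops, run in lockstep over range(p, m), produce related tables
lemma build_rel (w : List Char) :
    ∀ (q p : Nat) (nxtL : List Int) (failL : List Nat) (k : Nat),
      p + q = w.length → 1 ≤ p →
      nxtL.length = p → failL.length = w.length →
      (∀ r, r < p → nxtL.getD r (-1) = (failL.getD r 0 : Int) - 1) →
      (∀ r : Nat, failL.getD r 0 ≤ r) →
      k = failL.getD (p - 1) 0 →
      relT w.length
        (gnaOuter w (PySem.List.pyRange ((p : Nat) : Int) ((w.length : Nat) : Int) 1) nxtL)
        (failBuild w (PySem.List.pyRange ((p : Nat) : Int) ((w.length : Nat) : Int) 1) failL k) := by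
  intro q
  induction q with
  | zero =>
    intro p nxtL failL k hpq hp1 hlen hlenf hrel hB hk
    have hnil : PySem.List.pyRange ((p : Nat) : Int) ((w.length : Nat) : Int) 1 = [] := by
      rw [show ((p : Nat) : Int) = ((w.length : Nat) : Int) from by omega]
      simp [pysem]
    rw [hnil]
    simp only [gnaOuter, failBuild]
    exact ⟨by omega, hlenf, fun r hr => hrel r (by omega), hB⟩
  | succ q ihq =>
    intro p nxtL failL k hpq hp1 hlen hlenf hrel hB hk
    have hplt : p < w.length := by omega
    rw [PySem.List.pyRange_one_cons (by omega)]
    simp only [gnaOuter, failBuild]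
    -- A reads n0 = nxt[p-1] = fail[p-1] - 1 = k - 1
    have ep : ((p : Nat) : Int) - 1 = ((p - 1 : Nat) : Int) := by omega
    have hn0 : PySem.List.pyGetD nxtL (((p : Nat) : Int) - 1) (-1) = ((k : Nat) : Int) - 1 := by
      rw [ep, PySem.List.pyGetD_natCast, hrel (p - 1) (by omega), hk]
    rw [hn0]
    -- the appended table nxtC = nxtL ++ [-1]
    have hlenC : (nxtL ++ [-1]).length = p + 1 := by simp [hlen]
    have hlastC : (nxtL ++ [-1]).getD p (-1) = -1 := by
      rw [List.getD_append_right _ _ _ _ (by omega), hlen]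
      simp
    have hrelC : ∀ r, r < p → (nxtL ++ [-1]).getD r (-1) = (failL.getD r 0 : Int) - 1 := by
      intro r hr
      rw [List.getD_append _ _ _ _ (by omega)]
      exact hrel r hr
    have hkp1 : k ≤ p - 1 := by
      rw [hk]
      exact hB (p - 1)
    have hkp : k ≤ p := by omega
    have hinner := inner_rel w (nxtL ++ [-1]) failL p hplt hlenC hlastC hrelC hB
      k (w.length + 1) (w.length + 1) hkp (by omega) (by omega)
    rw [hinner]
    -- the updated tables and state for the next iteration
    set k1 := failCasc w failL (PySem.List.pyGetD w ((p : Nat) : Int) ' ') (w.length + 1) k with hk1def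
    have hk1le : k1 ≤ k := (failCasc_exit w failL _ hB k (w.length + 1) (by omega)).1
    set k2 := if PySem.List.pyGetD w ((p : Nat) : Int) ' ' =
        PySem.List.pyGetD w ((k1 : Nat) : Int) ' ' then k1 + 1 else k1 with hk2def
    have hk2le : k2 ≤ p := by
      rw [hk2def]
      split <;> omega
    have ec : ((p : Nat) : Int) + 1 = ((p + 1 : Nat) : Int) := by omega
    rw [ec, PySem.List.pySetD_natCast]
    refine ihq (p + 1) ((nxtL ++ [-1]).set p ((k2 : Int) - 1)) (failL.set p k2) k2
      (by omega) (by omega) (by simp [hlenC]) (by simp [hlenf]) ?_ ?_ ?_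
    · intro r hr
      rcases Nat.lt_or_ge r p with hrp | hrp
      · rw [getD_set_ne _ _ _ _ _ (by omega), getD_set_ne _ _ _ _ _ (by omega)]
        exact hrelC r hrp
      · have : r = p := by omega
        subst this
        rw [getD_set_self _ _ _ _ (by omega), getD_set_self _ _ _ _ (by omega)]
    · intro r
      rcases eq_or_ne r p with hrp | hrp
      · subst hrp
        rw [getD_set_self _ _ _ _ (by omega)]
        exact hk2le
      · rw [getD_set_ne _ _ _ _ _ hrp]
        exact hB r
    · rw [Nat.add_sub_cancel, getD_set_self _ _ _ _ (by omega)]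

-- replicate-of-zero lookups are zero
lemma getD_replicate_zero (m r : Nat) : (List.replicate m (0 : Nat)).getD r 0 = 0 := by
  rcases Nat.lt_or_ge r m with h | h
  · rw [List.getD_eq_getElem _ _ (by simpa using h)]
    simp
  · rw [List.getD_eq_default _ _ (by simpa using h)]

lemma tables_rel (w : List Char) (hw : 0 < w.length) :
    relT w.length (getNextArray w) (failTable w) := by
  unfold getNextArray failTable
  have h1 : (1 : Int) = ((1 : Nat) : Int) := by norm_num
  rw [h1]
  exact build_rel w (w.length - 1) 1 [-1] (List.replicate w.length 0) 0
    (by omega) (le_refl 1) rfl (by simp)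
    (fun r hr => by
      interval_cases r
      rw [getD_replicate_zero]
      rfl)
    (fun r => by rw [getD_replicate_zero]; omega)
    (by rw [getD_replicate_zero])

-- ===== VERDICT (by name: the statement is the Claim_ definition above) =====
theorem censor_spec : Claim_equal_censor := by
  unfold Claim_equal_censor
  intro text word hdom hpre
  unfold Spec_censor
  simp only [censor, censor_alt]
  by_cases hw : word.toList.length = 0
  · -- empty word: Pre_ forces text = ""; both sides are ""
    have hwe : word = "" := String.toList_eq_nil_iff.mp (List.eq_nil_of_length_eq_zero hw)
    have hte : text = "" := by
      rcases hpre with h | h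
      · exact absurd hwe h
      · exact h
    subst hte
    rw [if_pos hw]
    rfl
  · have hw' : 0 < word.toList.length := Nat.pos_of_ne_zero hw
    have hrel := tables_rel word.toList hw'
    rw [if_neg hw]
    have hA := censorGo_eq word.toList (getNextArray word.toList) (failTable word.toList)
      (List.replicate word.toList.length '*') hrel hw' (by simp)
      (text.toList.length + 1) text.toList 0 (by omega) (by omega)
    simp only [Nat.cast_zero, List.take_zero, List.drop_zero, List.nil_append] at hA
    rw [hA, join_nil_eq_flatten]
    have hB := scanGo_eq word.toList (failTable word.toList) text.toList
      (List.replicate word.toList.length '*') hrel.2.2.2 hw'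
      text.toList 0 0 0 [] rfl (le_refl 0) (by omega) hw'
    simp only [Nat.cast_zero, List.flatten_nil, List.nil_append, List.drop_zero, Nat.zero_add] at hB
    rw [hB]
    have hshape := pieces_shape word.toList (failTable word.toList) text.toList
      (List.replicate word.toList.length '*') hrel.2.2.2 hw' 0
    simp only [List.drop_zero, Nat.zero_add] at hshape
    rw [hshape]
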